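-- pv_equiv track=rewrite | github.com/ergetie/darkstar | debug/validate_ha_vs_sqlite_window.py | build_channel_set
-- ===== SOURCE A (Python) =====
-- def build_channel_set(raw: str | None) -> set[str]:
--     """
--     Parse --channels argument into a canonical set.
--
--     Supported canonical names:
--         load, pv, import, export, batt, batt_charge, batt_discharge
--     """
--     base = {"load", "pv", "import", "export", "batt_charge", "batt_discharge"}
--     if not raw:
--         return base
--
--     tokens = {token.strip().lower() for token in raw.split(",") if token.strip()}
--     result: set[str] = set()
--     for token in tokens:
--         if token == "batt":
--             result.add("batt_charge")
--             result.add("batt_discharge")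
--         elif token in base:
--             result.add(token)
--     return result or base
-- ===== SOURCE B (Python) =====
-- def build_channel_set(raw):
--     """
--     Parse --channels by a single character-level scan of the input (no split(),
--     no intermediate token set, no membership branching): accumulate the current
--     token and, at each comma boundary, flush it through a static contribution
--     table.
--     """
--     base = {"load", "pv", "import", "export", "batt_charge", "batt_discharge"}
--     if not raw:
--         return base
--     contrib = {
--         "load": ["load"],
--         "pv": ["pv"],
--         "import": ["import"],
--         "export": ["export"],
--         "batt_charge": ["batt_charge"],
--         "batt_discharge": ["batt_discharge"],
--         "batt": ["batt_charge", "batt_discharge"],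
--     }
--     result = set()
--     token = []
--     for ch in raw + ",":
--         if ch == ",":
--             for name in contrib.get("".join(token).strip().lower(), []):
--                 result.add(name)
--             token = []
--         else:
--             token.append(ch)
--     return result or base
-- ===== Notes on version B (the rewrite author's own statement) =====
-- stated objective: alternative
-- what changed: A splits on commas, dedups normalized tokens into a set and classifies each with an if/elif loop against a base set; B never splits: it makes one character-level streaming scan of the input with a trailing comma appended, accumulating the current token and, at each comma boundary, flushing it through a static token-to-contribution table, so the token set, the base-membership test and the branch dispatch all disappear.
import Mathlib
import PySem

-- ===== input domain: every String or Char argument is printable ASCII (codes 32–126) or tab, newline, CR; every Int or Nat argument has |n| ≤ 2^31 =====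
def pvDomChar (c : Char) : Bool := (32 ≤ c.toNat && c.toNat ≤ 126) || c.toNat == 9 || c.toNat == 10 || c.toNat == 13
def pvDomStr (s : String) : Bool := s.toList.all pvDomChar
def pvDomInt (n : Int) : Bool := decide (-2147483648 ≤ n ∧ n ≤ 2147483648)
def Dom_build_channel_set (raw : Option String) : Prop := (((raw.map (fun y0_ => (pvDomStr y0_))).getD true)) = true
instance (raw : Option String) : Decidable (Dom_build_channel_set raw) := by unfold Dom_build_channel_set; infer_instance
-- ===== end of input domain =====

-- B replaces A's split/dedup/branchy-loop pipeline by one character-level streaming scan (trailing comma appended)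
-- that flushes each comma-delimited token through a static contribution table; objective: alternative.

def pvBase : PySem.Set String :=
  PySem.Set.ofList ["load", "pv", "import", "export", "batt_charge", "batt_discharge"]

-- r.split(",") with the literal nonempty separator: split? is always some here, getD is a totality guard only
def pvSplit (r : String) : List String := (PySem.Str.split? r ",").getD []

-- ===== PORT A =====
def build_channel_set (raw : Option String) : List String :=
  match raw with
  | none => pvBase
  | some r =>
    if r = "" then pvBase
    else
      let tokens : PySem.Set String :=
        PySem.Set.ofList
          (((pvSplit r).filter
              (fun token => PySem.Str.strip token != "")).map
            (fun token => PySem.Str.lower (PySem.Str.strip token)))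
      let result : PySem.Set String :=
        tokens.foldl
          (fun s token =>
            if token = "batt" then
              PySem.Set.add (PySem.Set.add s "batt_charge") "batt_discharge"
            else if PySem.Set.contains pvBase token then
              PySem.Set.add s token
            else s)
          PySem.Set.empty
      if result = [] then pvBase else result

-- ===== PORT B =====
-- B's static table: normalized token → the canonical names it contributes
def pvContrib : PySem.Dict String (List String) :=
  ⟨[("load", ["load"]), ("pv", ["pv"]), ("import", ["import"]), ("export", ["export"]),
    ("batt_charge", ["batt_charge"]), ("batt_discharge", ["batt_discharge"]),
    ("batt", ["batt_charge", "batt_discharge"])]⟩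

-- B's character scanner: the for-ch loop of Source B (state = pending token chars, result set);
-- the inner 'for name in contrib.get(...): result.add(name)' is foldl Set.add = Set.update
def pvScan : List Char → List Char → PySem.Set String → PySem.Set String
  | [], _tok, s => s
  | c :: rest, tok, s =>
    if c = ',' then
      pvScan rest []
        (PySem.Set.update s
          (PySem.Dict.getD pvContrib
            (PySem.Str.lower (PySem.Str.strip (String.ofList tok))) []))
    else pvScan rest (tok ++ [c]) s

def build_channel_set_alt (raw : Option String) : List String :=
  match raw with
  | none => pvBase
  | some r =>
    if r = "" then pvBase
    else
      let result : PySem.Set String := pvScan (r ++ ",").toList [] PySem.Set.empty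
      if result = [] then pvBase else result

-- ===== PRECONDITION & SPEC =====
def Spec_build_channel_set (raw : Option String) (out : List String) : Prop := out = build_channel_set_alt raw
instance (raw : Option String) (out : List String) : Decidable (Spec_build_channel_set raw out) := by unfold Spec_build_channel_set; infer_instance

-- ===== CLAIM (what is proved, stated in full; the proofs are below) =====
def Claim_equal_build_channel_set : Prop := ∀ (raw : Option String), Dom_build_channel_set raw → Spec_build_channel_set raw (build_channel_set raw)

-- ===== LEMMAS AND PROOFS =====

-- the per-token expansion A's loop realises
def pvE (t : String) : List String :=
  if t = "batt" then ["batt_charge", "batt_discharge"]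
  else if PySem.Set.contains pvBase t then [t] else []

-- A's loop step adds exactly pvE t
theorem pv_step_eq_update (s : PySem.Set String) (t : String) :
    (if t = "batt" then
        PySem.Set.add (PySem.Set.add s "batt_charge") "batt_discharge"
      else if PySem.Set.contains pvBase t then PySem.Set.add s t else s)
      = PySem.Set.update s (pvE t) := by
  unfold pvE
  split_ifs <;> simp [PySem.Set.update]

-- the fold of A's loop over any list equals one bulk update by the flatMap
theorem pv_fold_eq_update (ys : List String) (s : PySem.Set String) :
    ys.foldl (fun s token =>
        if token = "batt" then
          PySem.Set.add (PySem.Set.add s "batt_charge") "batt_discharge"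
        else if PySem.Set.contains pvBase token then PySem.Set.add s token else s) s
      = PySem.Set.update s (ys.flatMap pvE) := by
  induction ys generalizing s with
  | nil => simp [PySem.Set.update]
  | cons t ys ih =>
      rw [List.foldl_cons, ih]
      simp only [List.flatMap_cons, PySem.Set.update_append, pv_step_eq_update]

-- updating with already-present elements is a no-op
theorem pv_update_of_subset (s : PySem.Set String) (l : List String)
    (h : ∀ y ∈ l, y ∈ s) : PySem.Set.update s l = s := by
  rw [PySem.Set.update_eq_append_filter]
  have hfil : (PySem.Set.ofList l).filter (fun y => !(PySem.Set.contains s y)) = [] := by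
    apply List.filter_eq_nil_iff.mpr
    intro y hy
    have hyl : y ∈ l := (PySem.Set.mem_ofList _ _).mp hy
    simpa using h y hyl
  rw [hfil, List.append_nil]

-- dedup of the token list before expanding does not change the resulting set
theorem pv_update_ofList (ys : List String) (s : PySem.Set String) :
    PySem.Set.update s ((PySem.Set.ofList ys).flatMap pvE)
      = PySem.Set.update s (ys.flatMap pvE) := by
  induction ys using List.reverseRecOn with
  | nil => rfl
  | append_singleton ys x ih =>
      rw [PySem.Set.ofList_append_singleton]
      by_cases hx : x ∈ PySem.Set.ofList ys
      · rw [PySem.Set.add_of_mem hx, ih, List.flatMap_append, PySem.Set.update_append]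
        refine (pv_update_of_subset _ _ ?_).symm
        intro y hy
        simp only [List.flatMap_cons, List.flatMap_nil, List.append_nil] at hy
        have hxys : x ∈ ys := (PySem.Set.mem_ofList _ _).mp hx
        have hmem : y ∈ ys.flatMap pvE := List.mem_flatMap.mpr ⟨x, hxys, hy⟩
        exact (PySem.Set.mem_update _ _ _).mpr (Or.inr hmem)
      · rw [PySem.Set.add_of_not_mem hx, List.flatMap_append, List.flatMap_append,
          PySem.Set.update_append, PySem.Set.update_append, ih]

-- tokens with empty strip expand to nothing, so A's filter is immaterial
theorem pv_flatMap_filter (l : List String) :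
    (l.filter (fun token => PySem.Str.strip token != "")).flatMap
        (fun token => pvE (PySem.Str.lower (PySem.Str.strip token)))
      = l.flatMap (fun token => pvE (PySem.Str.lower (PySem.Str.strip token))) := by
  induction l with
  | nil => rfl
  | cons t l ih =>
      by_cases h : PySem.Str.strip t = ""
      · have h0 : pvE (PySem.Str.lower "") = [] := by decide
        simp [h, h0, ih]
      · simp [h, ih]

-- B's table lookup is exactly A's per-token expansion
theorem pv_contrib_eq (t : String) :
    PySem.Dict.getD pvContrib t [] = pvE t := by
  unfold pvContrib pvE pvBase
  simp only [PySem.Dict.getD, PySem.Dict.get?, PySem.Set.contains, PySem.Set.ofList,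
    List.find?, List.contains]
  by_cases h1 : t = "load"
  · simp [h1]
  · by_cases h2 : t = "pv"
    · simp [h2]
    · by_cases h3 : t = "import"
      · simp [h3]
      · by_cases h4 : t = "export"
        · simp [h4]
        · by_cases h5 : t = "batt_charge"
          · simp [h5]
          · by_cases h6 : t = "batt_discharge"
            · simp [h6]
            · by_cases h7 : t = "batt"
              · simp [h7]
              · have e1 : ("load" == t) = false := by simp [Ne.symm h1]
                have e2 : ("pv" == t) = false := by simp [Ne.symm h2]
                have e3 : ("import" == t) = false := by simp [Ne.symm h3]
                have e4 : ("export" == t) = false := by simp [Ne.symm h4]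
                have e5 : ("batt_charge" == t) = false := by simp [Ne.symm h5]
                have e6 : ("batt_discharge" == t) = false := by simp [Ne.symm h6]
                have e7 : ("batt" == t) = false := by simp [Ne.symm h7]
                simp [e1, e2, e3, e4, e5, e6, e7, h1, h2, h3, h4, h5, h6, h7]

-- proof-only reference splitter: split a char list at commas (pre = pending prefix)
def pvSplitC (pre : List Char) : List Char → List (List Char)
  | [] => [pre]
  | c :: rest => if c = ',' then pre :: pvSplitC [] rest else pvSplitC (pre ++ [c]) rest

-- PySem's fuel-based splitter agrees with the reference splitter (sep = ",")
theorem pv_go_eq (fuel : Nat) :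
    ∀ (l cur : List Char) (acc : List (List Char)), l.length ≤ fuel →
      PySem.Chars.splitOn.go [','] fuel l cur acc
        = acc.reverse ++ pvSplitC cur.reverse l := by
  induction fuel with
  | zero =>
      intro l cur acc hl
      have : l = [] := List.eq_nil_of_length_eq_zero (Nat.le_zero.mp hl)
      subst this
      simp [PySem.Chars.splitOn.go, pvSplitC]
  | succ fuel ih =>
      intro l cur acc hl
      match l with
      | [] => simp [PySem.Chars.splitOn.go, pvSplitC]
      | c :: rest =>
          by_cases hc : c = ','
          · subst hc
            have hpre : List.isPrefixOf [','] (',' :: rest) = true := by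
              simp [List.isPrefixOf]
            simp only [PySem.Chars.splitOn.go, hpre, if_pos]
            rw [show List.drop [','].length (',' :: rest) = rest from rfl]
            rw [ih rest [] (List.reverse cur :: acc) (by simpa using Nat.le_of_succ_le_succ hl)]
            simp [pvSplitC]
          · have hpre : List.isPrefixOf [','] (c :: rest) = false := by
              simp [List.isPrefixOf, Ne.symm hc]
            simp only [PySem.Chars.splitOn.go, hpre, Bool.false_eq_true, if_false]
            rw [ih rest (c :: cur) acc (by simpa using Nat.le_of_succ_le_succ hl)]
            simp [pvSplitC, hc]

theorem pv_splitOn_eq (cs : List Char) :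
    PySem.Chars.splitOn cs [','] = pvSplitC [] cs := by
  unfold PySem.Chars.splitOn
  rw [pv_go_eq (cs.length + 1) cs [] [] (Nat.le_succ _)]
  rfl

-- a foldl of bulk updates is one bulk update by the flatMap
theorem pv_foldl_update {α : Type} (f : α → List String) (l : List α) (s : PySem.Set String) :
    l.foldl (fun s x => PySem.Set.update s (f x)) s = PySem.Set.update s (l.flatMap f) := by
  induction l generalizing s with
  | nil => simp [PySem.Set.update]
  | cons x l ih => rw [List.foldl_cons, ih]; simp [List.flatMap_cons, PySem.Set.update_append]

-- the scanner over cs+"," folds the reference splitter's tokens through the table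
theorem pv_scan_eq (cs : List Char) :
    ∀ (tok : List Char) (s : PySem.Set String),
      pvScan (cs ++ [',']) tok s
        = (pvSplitC tok cs).foldl
            (fun s t =>
              PySem.Set.update s
                (PySem.Dict.getD pvContrib
                  (PySem.Str.lower (PySem.Str.strip (String.ofList t))) [])) s := by
  induction cs with
  | nil => intro tok s; simp [pvScan, pvSplitC]
  | cons c rest ih =>
      intro tok s
      by_cases hc : c = ','
      · subst hc; simp [pvScan, pvSplitC, ih]
      · simp [pvScan, pvSplitC, hc, ih]

-- the some-r, r nonempty case
set_option maxHeartbeats 1000000 in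
theorem pv_some (r : String) (h : ¬ r = "") :
    build_channel_set (some r) = build_channel_set_alt (some r) := by
  have hsplit : pvSplit r = (pvSplitC [] r.toList).map String.ofList := by
    unfold pvSplit
    simp [PySem.Str.split?, PySem.Chars.split?, pv_splitOn_eq]
  have hA :
      ((PySem.Set.ofList
          (((pvSplit r).filter
              (fun token => PySem.Str.strip token != "")).map
            (fun token => PySem.Str.lower (PySem.Str.strip token)))).foldl
        (fun s token =>
          if token = "batt" then
            PySem.Set.add (PySem.Set.add s "batt_charge") "batt_discharge"
          else if PySem.Set.contains pvBase token then PySem.Set.add s token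
          else s)
        PySem.Set.empty)
      = PySem.Set.update PySem.Set.empty
          ((pvSplitC [] r.toList).flatMap
            (fun t => pvE (PySem.Str.lower (PySem.Str.strip (String.ofList t))))) := by
    rw [pv_fold_eq_update, pv_update_ofList, List.flatMap_map, pv_flatMap_filter, hsplit,
      List.flatMap_map]
  have hB :
      pvScan (r ++ ",").toList [] PySem.Set.empty
      = PySem.Set.update PySem.Set.empty
          ((pvSplitC [] r.toList).flatMap
            (fun t => pvE (PySem.Str.lower (PySem.Str.strip (String.ofList t))))) := by
    have htl : (r ++ ",").toList = r.toList ++ [','] := by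
      simp
    rw [htl, pv_scan_eq, pv_foldl_update]
    simp only [pv_contrib_eq]
  unfold build_channel_set build_channel_set_alt
  simp only [if_neg h]
  rw [hA, hB]

-- ===== VERDICT (by name: the statement is the Claim_ definition above) =====
theorem build_channel_set_spec : Claim_equal_build_channel_set := by
  intro raw _
  unfold Spec_build_channel_set
  match raw with
  | none => rfl
  | some r =>
    by_cases hr : r = ""
    · rw [hr]; decide
    · exact pv_some r hr
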